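-- pv_equiv track=rewrite | github.com/Tae4an/Baekjoon-Practice | src/python/브론즈/문어숫자_1864.py | convert_octopus_to_decimal
-- ===== SOURCE A (Python) =====
-- def convert_octopus_to_decimal(octopus_number):
--     # 기호와 숫자의 매핑
--     symbol_to_digit = {
--         '-': 0, '\\': 1, '(': 2, '@': 3, '?': 4, '>': 5, '&': 6, '%': 7, '/': -1
--     }
--
--     # 변환된 숫자를 저장할 리스트
--     digits = [symbol_to_digit[symbol] for symbol in octopus_number]
--
--     # 8진수로 변환
--     decimal_value = 0
--     base = 1  # 8의 제곱수
--
--     for digit in reversed(digits):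
--         decimal_value += digit * base
--         base *= 8
--
--     return decimal_value
-- ===== SOURCE B (Python) =====
-- SYMBOL_TO_DIGIT = {
--     '-': 0, '\\': 1, '(': 2, '@': 3, '?': 4, '>': 5, '&': 6, '%': 7, '/': -1
-- }
--
-- def convert_octopus_to_decimal(octopus_number):
--     # Recursive decomposition: strip the last (least significant) symbol,
--     # convert the prefix recursively, then shift and add the last digit.
--     if not octopus_number:
--         return 0
--     return convert_octopus_to_decimal(octopus_number[:-1]) * 8 \
--         + SYMBOL_TO_DIGIT[octopus_number[-1]]
-- ===== Notes on version B (the rewrite author's own statement) =====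
-- stated objective: simpler
-- what changed: Replaces A's digits list, reversed iteration and explicit base accumulator with a recursion on the string that converts the prefix and then shifts by 8 and adds the last symbol's digit.
import Mathlib
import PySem

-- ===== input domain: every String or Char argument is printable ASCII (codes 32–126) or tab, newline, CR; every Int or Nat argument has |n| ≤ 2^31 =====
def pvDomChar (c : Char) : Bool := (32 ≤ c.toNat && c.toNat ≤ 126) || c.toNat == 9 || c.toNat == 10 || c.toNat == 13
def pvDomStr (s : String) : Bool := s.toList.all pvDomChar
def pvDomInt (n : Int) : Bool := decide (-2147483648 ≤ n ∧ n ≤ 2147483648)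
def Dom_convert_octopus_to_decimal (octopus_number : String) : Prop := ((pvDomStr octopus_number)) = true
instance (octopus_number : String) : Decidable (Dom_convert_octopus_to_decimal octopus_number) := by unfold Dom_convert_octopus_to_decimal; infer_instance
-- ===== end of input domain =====

-- B replaces A's digits list, reversed iteration and base accumulator with a
-- recursion on the string: convert the prefix, shift by 8, add the last digit
-- (objective: simpler decomposition, same linear number of steps).

-- ===== PORT A =====
-- the symbol_to_digit mapping; 0 for symbols outside the dict (those inputs raise
-- KeyError in Python and are excluded by Pre_)
def pvSym (c : Char) : Int :=
  if c = '-' then 0 else if c = '\\' then 1 else if c = '(' then 2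
  else if c = '@' then 3 else if c = '?' then 4 else if c = '>' then 5
  else if c = '&' then 6 else if c = '%' then 7 else if c = '/' then -1 else 0

def convert_octopus_to_decimal (octopus_number : String) : Int :=
  let digits : List Int := octopus_number.toList.map pvSym
  let p := digits.reverse.foldl
    (fun (p : Int × Int) digit => (p.1 + digit * p.2, p.2 * 8)) (0, 1)
  p.1

-- ===== PORT B =====
-- B's recursion on octopus_number, as recursion on its character list:
-- octopus_number[:-1] is dropLast, octopus_number[-1] is getLast
def pvRecB : List Char → Int
  | [] => 0
  | c :: t =>
      pvRecB (List.dropLast (c :: t)) * 8 + pvSym (List.getLastD (c :: t) c)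
termination_by l => l.length
decreasing_by simp

def convert_octopus_to_decimal_alt (octopus_number : String) : Int :=
  pvRecB octopus_number.toList

-- ===== PRECONDITION & SPEC =====
-- Pre_ excludes exactly the strings containing a character outside the octopus
-- symbol dict, on which Python's A raises KeyError (B raises there too).
def Pre_convert_octopus_to_decimal (octopus_number : String) : Prop :=
  (octopus_number.toList.all
    (fun c => c ∈ ['-', '\\', '(', '@', '?', '>', '&', '%', '/'])) = true
instance (octopus_number : String) : Decidable (Pre_convert_octopus_to_decimal octopus_number) := by unfold Pre_convert_octopus_to_decimal; infer_instance
def pvWitness_convert_octopus_to_decimal : String := "%-"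

def Spec_convert_octopus_to_decimal (octopus_number : String) (out : Int) : Prop := out = convert_octopus_to_decimal_alt octopus_number
instance (octopus_number : String) (out : Int) : Decidable (Spec_convert_octopus_to_decimal octopus_number out) := by unfold Spec_convert_octopus_to_decimal; infer_instance

-- ===== CLAIM (what is proved, stated in full; the proofs are below) =====
def Claim_equal_convert_octopus_to_decimal : Prop := ∀ (octopus_number : String), Dom_convert_octopus_to_decimal octopus_number → Pre_convert_octopus_to_decimal octopus_number → Spec_convert_octopus_to_decimal octopus_number (convert_octopus_to_decimal octopus_number)

-- ===== LEMMAS AND PROOFS =====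

-- little-endian base-8 value of a digit list
def pvValLE : List Int → Int
  | [] => 0
  | d :: ds => d + 8 * pvValLE ds

theorem pvA_fold (l : List Int) (d b : Int) :
    l.foldl (fun (p : Int × Int) digit => (p.1 + digit * p.2, p.2 * 8)) (d, b)
      = (d + b * pvValLE l, b * 8 ^ l.length) := by
  induction l generalizing d b with
  | nil => simp [pvValLE]
  | cons h t ih =>
      simp [List.foldl, ih, pvValLE, pow_succ]
      constructor <;> ring

theorem pvRecB_concat (xs : List Char) (x : Char) :
    pvRecB (xs ++ [x]) = pvRecB xs * 8 + pvSym x := by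
  cases xs with
  | nil => simp [pvRecB]
  | cons c t =>
      rw [show (c :: t) ++ [x] = c :: (t ++ [x]) from rfl, pvRecB]
      have h1 : (c :: (t ++ [x])).dropLast = c :: t := by
        rw [show c :: (t ++ [x]) = (c :: t) ++ [x] from rfl, List.dropLast_concat]
      have h2 : (c :: (t ++ [x])).getLastD c = x := by
        rw [show c :: (t ++ [x]) = (c :: t) ++ [x] from rfl, List.getLastD_concat]
      rw [h1, h2]

theorem pvRecB_eq (l : List Char) :
    pvValLE ((l.map pvSym).reverse) = pvRecB l := by
  induction l using List.reverseRecOn with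
  | nil => simp [pvValLE, pvRecB]
  | append_singleton xs x ih =>
      rw [pvRecB_concat]
      simp only [List.map_append, List.map_cons, List.map_nil,
        List.reverse_append, List.reverse_cons, List.reverse_nil]
      simp [pvValLE, ← ih]
      ring

-- ===== VERDICT (by name: the statement is the Claim_ definition above) =====
theorem convert_octopus_to_decimal_spec : Claim_equal_convert_octopus_to_decimal := by
  intro s _ _
  unfold Spec_convert_octopus_to_decimal convert_octopus_to_decimal convert_octopus_to_decimal_alt
  simp only [pvA_fold, ← pvRecB_eq]
  ring
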